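-- pv_equiv track=rewrite | github.com/Cyb3rKotl3Ta/Just_Chill_Python | codewars/foundation/ex_38_sort_the_odd.py | sort_odd_numbers
-- ===== SOURCE A (Python) =====
-- def sort_odd_numbers(arr):
--     odd_numbers = sorted([num for num in arr if num % 2 != 0])
--
--     sorted_arr = []
--     odd_index = 0
--     for num in arr:
--         if num % 2 != 0:
--             sorted_arr.append(odd_numbers[odd_index])
--             odd_index += 1
--         else:
--             sorted_arr.append(num)
--
--     return sorted_arr
-- ===== SOURCE B (Python) =====
-- def sort_odd_numbers(arr):
--     # Hand-rolled bottom-up mergesort of the odd values, then scatter the run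
--     # into a copy of arr at the odd positions; no library sort, no counter merge.
--     def merge(xs, ys):
--         out = []
--         i = j = 0
--         while i < len(xs) and j < len(ys):
--             if xs[i] <= ys[j]:
--                 out.append(xs[i]); i += 1
--             else:
--                 out.append(ys[j]); j += 1
--         out.extend(xs[i:])
--         out.extend(ys[j:])
--         return out
--
--     def merge_pass(runs):
--         out = []
--         i = 0
--         while i + 1 < len(runs):
--             out.append(merge(runs[i], runs[i + 1]))
--             i += 2
--         if i < len(runs):
--             out.append(runs[i])
--         return out
--
--     runs = [[v] for v in arr if v % 2 != 0]
--     while len(runs) > 1: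
--         runs = merge_pass(runs)
--     sorted_odds = runs[0] if runs else []
--
--     result = list(arr)
--     for i, v in zip([j for j, x in enumerate(arr) if x % 2 != 0], sorted_odds):
--         result[i] = v
--     return result
-- ===== Notes on version B (the rewrite author's own statement) =====
-- stated objective: alternative
-- what changed: Replaces A's library sort plus interleaved counter-driven merge pass by a hand-written bottom-up mergesort (singleton runs repeatedly merged pairwise by an explicit two-pointer merge) of the odd values, whose single final run is scatter-assigned into a copy of arr at the recorded odd positions.
import Mathlib
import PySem

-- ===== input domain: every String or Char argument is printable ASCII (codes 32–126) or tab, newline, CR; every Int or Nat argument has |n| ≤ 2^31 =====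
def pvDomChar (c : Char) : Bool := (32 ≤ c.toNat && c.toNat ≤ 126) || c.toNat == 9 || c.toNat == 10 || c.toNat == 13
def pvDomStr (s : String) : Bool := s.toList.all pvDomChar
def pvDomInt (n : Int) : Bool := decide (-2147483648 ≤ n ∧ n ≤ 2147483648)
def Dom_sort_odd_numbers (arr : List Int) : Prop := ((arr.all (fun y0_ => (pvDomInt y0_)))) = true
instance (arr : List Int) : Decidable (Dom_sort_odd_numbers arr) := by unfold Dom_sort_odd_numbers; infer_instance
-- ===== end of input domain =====

-- B replaces A's library sort + interleaved counter merge by a hand-written bottom-up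
-- mergesort of the odd values scattered into a copy of arr; same result, different algorithm.


-- ===== PORT A =====
-- Literal port of A: sort the odds, then one pass over arr appending odd_numbers[odd_index]
-- (in range whenever Python reads it; ported with pyGetD) or the even number unchanged.
def sort_odd_numbers (arr : List Int) : List Int :=
  let odd_numbers := PySem.List.sorted (arr.filter (fun num => PySem.Int.mod num 2 ≠ 0)) (fun x => x) false
  (arr.foldl (fun (st : List Int × Int) num =>
      if PySem.Int.mod num 2 ≠ 0 then
        (st.1 ++ [PySem.List.pyGetD odd_numbers st.2 0], st.2 + 1)
      else
        (st.1 ++ [num], st.2)) ([], 0)).1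

-- ===== PORT B =====
-- B's `merge`: the two-pointer while loop over xs[i:], ys[j:] ported as recursion on the
-- unread suffixes (out.append / the trailing out.extend of the leftover suffix are the conses).
def merge2 : List Int → List Int → List Int
  | [], ys => ys
  | x :: xs, [] => x :: xs
  | x :: xs, y :: ys =>
    if x ≤ y then x :: merge2 xs (y :: ys) else y :: merge2 (x :: xs) ys
termination_by xs ys => xs.length + ys.length

-- B's `merge_pass`: the index loop reading runs[i], runs[i+1] with i += 2 ported as
-- recursion consuming two runs at a time; the trailing `if i < len(runs)` is the final case.
def mergePass : List (List Int) → List (List Int)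
  | [] => []
  | [r] => [r]
  | r1 :: r2 :: rs => merge2 r1 r2 :: mergePass rs

-- termination measure for the `while len(runs) > 1` loop (cited by msortLoop's decreasing_by)
lemma mergePass_length_le : ∀ (rs : List (List Int)), (mergePass rs).length ≤ rs.length := by
  intro rs
  induction rs using mergePass.induct with
  | case1 => simp [mergePass]
  | case2 r => simp [mergePass]
  | case3 r1 r2 rs ih => simp only [mergePass, List.length_cons]; omega

lemma mergePass_length_lt (rs : List (List Int)) (h : 1 < rs.length) :
    (mergePass rs).length < rs.length := by
  match rs, h with
  | r1 :: r2 :: rs, _ =>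
    have := mergePass_length_le rs
    simp only [mergePass, List.length_cons]
    omega

-- B's `while len(runs) > 1: runs = merge_pass(runs)` loop.
def msortLoop (runs : List (List Int)) : List (List Int) :=
  if _h : 1 < runs.length then msortLoop (mergePass runs) else runs
termination_by runs.length
decreasing_by exact mergePass_length_lt runs _h

-- Literal port of B: singleton runs of the odd values, the merge-pass loop, runs[0] if runs
-- else [] (headD), then the zip of odd positions with the run assigned into a copy of arr.
def sort_odd_numbers_alt (arr : List Int) : List Int :=
  let runs := msortLoop ((arr.filter (fun v => PySem.Int.mod v 2 ≠ 0)).map (fun v => [v]))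
  let sorted_odds := runs.headD []
  ((((PySem.List.enumerate arr 0).filter (fun p => PySem.Int.mod p.2 2 ≠ 0)).map Prod.fst).zip
      sorted_odds).foldl (fun result iv => PySem.List.pySetD result iv.1 iv.2) arr

-- ===== PRECONDITION & SPEC =====
def Spec_sort_odd_numbers (arr : List Int) (out : List Int) : Prop := out = sort_odd_numbers_alt arr
instance (arr : List Int) (out : List Int) : Decidable (Spec_sort_odd_numbers arr out) := by unfold Spec_sort_odd_numbers; infer_instance

-- ===== CLAIM (what is proved, stated in full; the proofs are below) =====
def Claim_equal_sort_odd_numbers : Prop := ∀ (arr : List Int), Dom_sort_odd_numbers arr → Spec_sort_odd_numbers arr (sort_odd_numbers arr)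

-- ===== LEMMAS AND PROOFS =====

-- Common reference: merge arr against a queue of odd replacements.
def mergeOdds : List Int → List Int → List Int
  | [], _ => []
  | x :: xs, odds =>
    if PySem.Int.mod x 2 ≠ 0 then odds.headD 0 :: mergeOdds xs odds.tail
    else x :: mergeOdds xs odds

lemma pymod_two (x : Int) : PySem.Int.mod x 2 = x % 2 :=
  PySem.Int.mod_eq_emod_of_pos (by omega)

lemma aLoop_eq (odds : List Int) :
    ∀ (arr acc : List Int) (i : Nat),
      (arr.foldl (fun (st : List Int × Int) num =>
          if PySem.Int.mod num 2 ≠ 0 then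
            (st.1 ++ [PySem.List.pyGetD odds st.2 0], st.2 + 1)
          else
            (st.1 ++ [num], st.2)) (acc, (i : Int))).1
        = acc ++ mergeOdds arr (odds.drop i) := by
  intro arr
  induction arr with
  | nil => intro acc i; simp [mergeOdds]
  | cons x xs ih =>
    intro acc i
    by_cases h : PySem.Int.mod x 2 ≠ 0
    · have hdvd : ¬ (2 ∣ x) := by rw [pymod_two] at h; omega
      have h1 : ((i : Int) + 1) = ((i + 1 : Nat) : Int) := by push_cast; ring
      simp only [List.foldl_cons, if_pos h, h1]
      rw [ih (acc ++ [PySem.List.pyGetD odds (i : Int) 0]) (i + 1)]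
      simp [mergeOdds, hdvd, PySem.List.pyGetD_natCast, List.tail_drop]
    · have hm : x % 2 = 0 := by rw [pymod_two] at h; omega
      simp only [List.foldl_cons, if_neg h]
      rw [ih (acc ++ [x]) i]
      simp [mergeOdds, hm]

lemma merge2_perm : ∀ (xs ys : List Int), (merge2 xs ys).Perm (xs ++ ys) := by
  intro xs ys
  induction xs, ys using merge2.induct with
  | case1 ys => simp [merge2]
  | case2 x xs => simp [merge2]
  | case3 x xs y ys hle ih =>
    rw [merge2, if_pos hle]
    exact (ih.cons x)
  | case4 x xs y ys hle ih =>
    rw [merge2, if_neg hle]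
    exact (ih.cons y).trans (List.perm_middle (a := y) (l₁ := x :: xs) (l₂ := ys)).symm

lemma merge2_pairwise : ∀ (xs ys : List Int),
    xs.Pairwise (· ≤ ·) → ys.Pairwise (· ≤ ·) → (merge2 xs ys).Pairwise (· ≤ ·) := by
  intro xs ys
  induction xs, ys using merge2.induct with
  | case1 ys => intro _ h; simpa [merge2] using h
  | case2 x xs => intro h _; simpa [merge2] using h
  | case3 x xs y ys hle ih =>
    intro hx hy
    rw [merge2, if_pos hle]
    refine List.pairwise_cons.mpr ⟨?_, ih (List.pairwise_cons.mp hx).2 hy⟩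
    intro z hz
    rcases List.mem_append.mp ((merge2_perm xs (y :: ys)).mem_iff.mp hz) with h' | h'
    · exact List.rel_of_pairwise_cons hx h'
    · rcases List.mem_cons.mp h' with rfl | h''
      · exact hle
      · exact le_trans hle (List.rel_of_pairwise_cons hy h'')
  | case4 x xs y ys hle ih =>
    intro hx hy
    rw [merge2, if_neg hle]
    have hyx : y ≤ x := le_of_not_ge hle
    refine List.pairwise_cons.mpr ⟨?_, ih hx (List.pairwise_cons.mp hy).2⟩
    intro z hz
    rcases List.mem_append.mp ((merge2_perm (x :: xs) ys).mem_iff.mp hz) with h' | h'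
    · rcases List.mem_cons.mp h' with rfl | h''
      · exact hyx
      · exact le_trans hyx (List.rel_of_pairwise_cons hx h'')
    · exact (List.pairwise_cons.mp hy).1 z h'

lemma mergePass_flatten_perm : ∀ (rs : List (List Int)),
    (mergePass rs).flatten.Perm rs.flatten := by
  intro rs
  induction rs using mergePass.induct with
  | case1 => simp [mergePass]
  | case2 r => simp [mergePass]
  | case3 r1 r2 rs ih =>
    simp only [mergePass, List.flatten_cons]
    have h1 := (merge2_perm r1 r2).append_right ((mergePass rs).flatten)
    have h2 := ih.append_left (r1 ++ r2)
    simpa [List.append_assoc] using h1.trans h2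

lemma mergePass_sorted : ∀ (rs : List (List Int)),
    (∀ r ∈ rs, r.Pairwise (· ≤ ·)) → ∀ r ∈ mergePass rs, r.Pairwise (· ≤ ·) := by
  intro rs
  induction rs using mergePass.induct with
  | case1 => intro h r hr; exact h r hr
  | case2 r' => intro h r hr; exact h r (by simpa [mergePass] using hr)
  | case3 r1 r2 rs ih =>
    intro h r hr
    rcases List.mem_cons.mp (by simpa [mergePass] using hr) with rfl | hr
    · exact merge2_pairwise r1 r2 (h r1 (by simp)) (h r2 (by simp))
    · exact ih (fun r hr => h r (by simp [hr])) r hr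

lemma msortLoop_flatten_perm : ∀ (rs : List (List Int)),
    (msortLoop rs).flatten.Perm rs.flatten := by
  intro rs
  induction rs using msortLoop.induct with
  | case1 rs h ih =>
    rw [msortLoop, dif_pos h]
    exact ih.trans (mergePass_flatten_perm rs)
  | case2 rs h =>
    rw [msortLoop, dif_neg h]

lemma msortLoop_sorted : ∀ (rs : List (List Int)),
    (∀ r ∈ rs, r.Pairwise (· ≤ ·)) → ∀ r ∈ msortLoop rs, r.Pairwise (· ≤ ·) := by
  intro rs
  induction rs using msortLoop.induct with
  | case1 rs h ih =>
    intro hs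
    rw [msortLoop, dif_pos h]
    exact ih (mergePass_sorted rs hs)
  | case2 rs h =>
    intro hs
    rw [msortLoop, dif_neg h]
    exact hs

lemma msortLoop_length_le_one : ∀ (rs : List (List Int)), (msortLoop rs).length ≤ 1 := by
  intro rs
  induction rs using msortLoop.induct with
  | case1 rs h ih => rw [msortLoop, dif_pos h]; exact ih
  | case2 rs h => rw [msortLoop, dif_neg h]; omega

lemma headD_eq_flatten_of_length_le_one (rs : List (List Int)) (h : rs.length ≤ 1) :
    rs.headD [] = rs.flatten := by
  match rs, h with
  | [], _ => rfl
  | [r], _ => simp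

lemma flatten_map_singleton (l : List Int) : (l.map (fun v => [v])).flatten = l := by
  induction l <;> simp_all

-- B's final run is exactly sorted(odds): it is a ≤-sorted permutation of the odd values.
lemma msort_eq_sorted (odds : List Int) :
    (msortLoop (odds.map (fun v => [v]))).headD []
      = PySem.List.sorted odds (fun x => x) false := by
  set rs := odds.map (fun v => [v]) with hrs
  have hperm : ((msortLoop rs).headD []).Perm odds := by
    rw [headD_eq_flatten_of_length_le_one _ (msortLoop_length_le_one rs)]
    have h := msortLoop_flatten_perm rs
    rwa [hrs, flatten_map_singleton] at h
  have hpair : ((msortLoop rs).headD []).Pairwise (· ≤ ·) := by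
    rw [headD_eq_flatten_of_length_le_one _ (msortLoop_length_le_one rs)]
    have hs := msortLoop_sorted rs (by intro r hr; rcases List.mem_map.mp hr with ⟨v, _, rfl⟩; simp)
    rcases h1 : msortLoop rs with _ | ⟨r, rest⟩
    · simp
    · have : rest = [] := by
        have := msortLoop_length_le_one rs
        rw [h1] at this; simpa using List.length_eq_zero_iff.mp (by simpa using this)
      subst this
      simpa using hs r (by rw [h1]; simp)
  exact (PySem.List.sorted_id_eq_of_perm_of_pairwise _ _ hperm hpair).symm

lemma scatter_eq :
    ∀ (arr pre odds : List Int),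
      odds.length = (arr.filter (fun num => PySem.Int.mod num 2 ≠ 0)).length →
      (((((PySem.List.enumerate arr (pre.length : Int)).filter
            (fun p => PySem.Int.mod p.2 2 ≠ 0)).map Prod.fst).zip odds).foldl
          (fun result iv => PySem.List.pySetD result iv.1 iv.2) (pre ++ arr))
        = pre ++ mergeOdds arr odds := by
  intro arr
  induction arr with
  | nil => intro pre odds _; simp [PySem.List.enumerate, mergeOdds]
  | cons x xs ih =>
    intro pre odds hlen
    rw [PySem.List.enumerate_cons]
    by_cases h : PySem.Int.mod x 2 ≠ 0
    · have hm : x % 2 = 1 := by rw [pymod_two] at h; omega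
      have hdvd : ¬ (2 ∣ x) := by omega
      obtain ⟨v, vs, rfl⟩ : ∃ v vs, odds = v :: vs := by
        cases odds with
        | nil => simp [hm] at hlen
        | cons v vs => exact ⟨v, vs, rfl⟩
      have hlen' : vs.length = (xs.filter (fun num => PySem.Int.mod num 2 ≠ 0)).length := by
        simp [hm] at hlen; simpa using hlen
      simp only [List.filter_cons, if_pos (show decide (PySem.Int.mod x 2 ≠ 0) = true from decide_eq_true h),
        List.map_cons, List.zip_cons_cons, List.foldl_cons]
      have hset : PySem.List.pySetD (pre ++ x :: xs) (pre.length : Int) v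
          = (pre ++ [v]) ++ xs := by
        rw [PySem.List.pySetD_natCast]; simp
      rw [hset]
      have hlen2 : ((pre.length : Int) + 1) = (((pre ++ [v]).length : Nat) : Int) := by
        simp
      rw [hlen2, ih (pre ++ [v]) vs hlen']
      simp [mergeOdds, hdvd]
    · have hm : x % 2 = 0 := by rw [pymod_two] at h; omega
      have hlen' : odds.length = (xs.filter (fun num => PySem.Int.mod num 2 ≠ 0)).length := by
        simp [hm] at hlen; simpa using hlen
      simp only [List.filter_cons, if_neg (show ¬ decide (PySem.Int.mod x 2 ≠ 0) = true by simpa using h)]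
      have hpx : pre ++ x :: xs = (pre ++ [x]) ++ xs := by simp
      have hlen2 : ((pre.length : Int) + 1) = (((pre ++ [x]).length : Nat) : Int) := by
        simp
      rw [hpx, hlen2, ih (pre ++ [x]) odds hlen']
      simp [mergeOdds, hm]

-- ===== VERDICT (by name: the statement is the Claim_ definition above) =====
theorem sort_odd_numbers_spec : Claim_equal_sort_odd_numbers := by
  intro arr _
  have ha := aLoop_eq
    (PySem.List.sorted (arr.filter (fun num => PySem.Int.mod num 2 ≠ 0)) (fun x => x) false)
    arr [] 0
  have hsc := scatter_eq arr []
    (PySem.List.sorted (arr.filter (fun num => PySem.Int.mod num 2 ≠ 0)) (fun x => x) false)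
    (PySem.List.length_sorted
      (arr.filter (fun num => PySem.Int.mod num 2 ≠ 0)) (key := fun x => x) (rev := false))
  simp only [Nat.cast_zero, List.nil_append, List.drop_zero, List.length_nil] at ha hsc
  simp only [Spec_sort_odd_numbers, sort_odd_numbers, sort_odd_numbers_alt]
  rw [msort_eq_sorted, ha, hsc]
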